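-- pv_equiv track=rewrite | github.com/eronekogin/leetcode | 2022/html_entity_parser.py | entityParser
-- ===== SOURCE A (Python) =====
-- def entityParser(text: str) -> str:
--     mapping = [
--         ('&quot;', '"'),
--         ('&apos;', "'"),
--         ('&gt;', '>'),
--         ('&lt;', '<'),
--         ('&frasl;', '/'),
--         ('&amp;', '&'),
--     ]
--     rslt = text
--     for key, value in mapping:
--         rslt = rslt.replace(key, value)
--
--     return rslt
-- ===== SOURCE B (Python) =====
-- def entityParser(text: str) -> str:
--     table = {
--         '&quot;': '"',
--         '&apos;': "'",
--         '&gt;': '>',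
--         '&lt;': '<',
--         '&frasl;': '/',
--         '&amp;': '&',
--     }
--     out = []
--     i = 0
--     n = len(text)
--     while i < n:
--         if text[i] == '&':
--             for ent, ch in table.items():
--                 if text.startswith(ent, i):
--                     out.append(ch)
--                     i += len(ent)
--                     break
--             else:
--                 out.append(text[i])
--                 i += 1
--         else:
--             out.append(text[i])
--             i += 1
--     return ''.join(out)
-- ===== Notes on version B (the rewrite author's own statement) =====
-- stated objective: alternative
-- what changed: Replaces A's six sequential full-string str.replace passes with a single left-to-right scan that resolves the entity beginning at each ampersand position and emits the output once; equivalent because no pass's replacement character can create or destroy a match for a later pass.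
import Mathlib
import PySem

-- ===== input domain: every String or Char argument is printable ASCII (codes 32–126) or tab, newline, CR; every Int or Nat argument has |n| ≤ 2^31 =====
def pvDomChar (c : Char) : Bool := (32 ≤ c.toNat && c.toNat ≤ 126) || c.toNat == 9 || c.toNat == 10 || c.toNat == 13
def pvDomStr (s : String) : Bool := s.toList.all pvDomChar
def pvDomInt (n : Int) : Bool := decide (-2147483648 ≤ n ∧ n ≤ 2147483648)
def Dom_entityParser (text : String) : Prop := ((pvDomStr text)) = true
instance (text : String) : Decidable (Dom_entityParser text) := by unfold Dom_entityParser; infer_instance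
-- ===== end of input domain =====

-- B replaces A's six sequential full-string str.replace passes by one left-to-right scan that
-- resolves the entity beginning at each ampersand position (objective: alternative single-pass algorithm).

-- ===== PORT A =====
def entityParser (text : String) : String :=
  let mapping : List (String × String) :=
    [("&quot;", "\""), ("&apos;", "'"), ("&gt;", ">"),
     ("&lt;", "<"), ("&frasl;", "/"), ("&amp;", "&")]
  mapping.foldl (fun rslt kv => PySem.Str.replace rslt kv.1 kv.2) text

-- ===== PORT B =====
-- the six entities of Source B's table, as char lists
def pvEQ : List Char := ['&', 'q', 'u', 'o', 't', ';']
def pvEA : List Char := ['&', 'a', 'p', 'o', 's', ';']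
def pvEG : List Char := ['&', 'g', 't', ';']
def pvEL : List Char := ['&', 'l', 't', ';']
def pvEF : List Char := ['&', 'f', 'r', 'a', 's', 'l', ';']
def pvEM : List Char := ['&', 'a', 'm', 'p', ';']

-- transliteration of Source B's while loop: at each position try the table entries in order,
-- emit the mapped char and jump past the entity, otherwise emit the char and move on
def pvScan : List Char → List Char
  | [] => []
  | c :: t =>
    if c = '&' then
      if pvEQ.isPrefixOf (c :: t) then '"' :: pvScan (t.drop 5)
      else if pvEA.isPrefixOf (c :: t) then '\'' :: pvScan (t.drop 5)
      else if pvEG.isPrefixOf (c :: t) then '>' :: pvScan (t.drop 3)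
      else if pvEL.isPrefixOf (c :: t) then '<' :: pvScan (t.drop 3)
      else if pvEF.isPrefixOf (c :: t) then '/' :: pvScan (t.drop 6)
      else if pvEM.isPrefixOf (c :: t) then '&' :: pvScan (t.drop 4)
      else c :: pvScan t
    else c :: pvScan t
termination_by l => l.length
decreasing_by all_goals simp only [List.length_drop, List.length_cons]; omega

def entityParser_alt (text : String) : String := String.ofList (pvScan text.toList)

-- ===== PRECONDITION & SPEC =====
def Spec_entityParser (text : String) (out : String) : Prop := out = entityParser_alt text
instance (text : String) (out : String) : Decidable (Spec_entityParser text out) := by unfold Spec_entityParser; infer_instance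

-- ===== CLAIM (what is proved, stated in full; the proofs are below) =====
def Claim_equal_entityParser : Prop := ∀ (text : String), Dom_entityParser text → Spec_entityParser text (entityParser text)

-- ===== LEMMAS AND PROOFS =====

-- structural characterization of PySem.Chars.replace with a nonempty pattern
def pvRep (o : Char) (os : List Char) (new : List Char) : List Char → List Char
  | [] => []
  | c :: t =>
    if (o :: os).isPrefixOf (c :: t) then new ++ pvRep o os new (t.drop os.length)
    else c :: pvRep o os new t
termination_by l => l.length
decreasing_by all_goals simp only [List.length_drop, List.length_cons]; omega

theorem pvRep_nil (o : Char) (os new : List Char) : pvRep o os new [] = [] := by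
  simp [pvRep]

theorem pvRep_cons (o : Char) (os new : List Char) (c : Char) (t : List Char) :
    pvRep o os new (c :: t) =
      if (o :: os).isPrefixOf (c :: t) then new ++ pvRep o os new (t.drop os.length)
      else c :: pvRep o os new t := by
  rw [pvRep]

theorem pvGo_eq (o : Char) (os new : List Char) :
    ∀ (fuel : Nat) (l acc : List Char), l.length ≤ fuel →
      PySem.Chars.replace.go (o :: os) new fuel l acc = acc.reverse ++ pvRep o os new l := by
  intro fuel
  induction fuel with
  | zero =>
    intro l acc h
    have hl : l = [] := List.eq_nil_of_length_eq_zero (Nat.le_zero.mp h)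
    subst hl
    rw [PySem.Chars.replace.go]
    simp [pvRep_nil]
  | succ f ih =>
    intro l acc h
    cases l with
    | nil => rw [PySem.Chars.replace.go]; simp [pvRep_nil]; omega
    | cons c t =>
      rw [PySem.Chars.replace.go]
      by_cases hp : (o :: os).isPrefixOf (c :: t)
      · simp only [hp, if_true]
        rw [ih _ _ (by simp at h ⊢; omega)]
        rw [pvRep_cons]
        simp [hp]
      · simp only [hp, Bool.false_eq_true, if_false]
        rw [ih _ _ (by simp at h ⊢; omega)]
        rw [pvRep_cons]
        simp [hp]

theorem pvReplace_eq (o : Char) (os new l : List Char) :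
    PySem.Chars.replace l (o :: os) new = pvRep o os new l := by
  rw [PySem.Chars.replace]
  simp only [List.isEmpty_cons, Bool.false_eq_true, if_false]
  rw [pvGo_eq o os new l.length l [] (Nat.le_refl _)]
  simp

-- a replace pass walks over a block x in which its pattern matches nowhere
theorem pvRep_skip (o : Char) (os new : List Char) :
    ∀ (x y : List Char), (∀ p, p < x.length → ¬ (o :: os).isPrefixOf (x.drop p ++ y)) →
      pvRep o os new (x ++ y) = x ++ pvRep o os new y := by
  intro x
  induction x with
  | nil => intro y _; simp
  | cons c x' ih =>
    intro y H
    have h0 : ¬ (o :: os).isPrefixOf (c :: (x' ++ y)) := by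
      have := H 0 (by simp)
      simpa using this
    rw [List.cons_append, pvRep_cons]
    simp only [h0, Bool.false_eq_true, if_false]
    rw [ih y (fun p hp => by
      have := H (p + 1) (by simp; omega)
      simpa using this)]
    simp

-- if e and x disagree at index d (inside both), e is not a prefix of x ++ u
theorem pv_not_prefix_of_mismatch :
    ∀ (e x u : List Char) (d : Nat), d < e.length → d < x.length → e[d]? ≠ x[d]? →
      ¬ e.isPrefixOf (x ++ u) := by
  intro e
  induction e with
  | nil => intro x u d hd; simp at hd
  | cons a e' ih =>
    intro x u d hd hx hne hpre
    cases x with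
    | nil => simp at hx
    | cons b x' =>
      simp only [List.cons_append, List.isPrefixOf, Bool.and_eq_true, beq_iff_eq] at hpre
      cases d with
      | zero => simp at hne; exact hne hpre.1
      | succ d' =>
        exact ih x' u d' (by simpa using hd) (by simpa using hx) (by simpa using hne) hpre.2

-- a replacement char that does not occur in x cannot make x appear as a prefix
theorem pv_prefix_pvRep (o : Char) (os : List Char) (v : Char) :
    ∀ (l x : List Char), v ∉ x → x.isPrefixOf (pvRep o os [v] l) → x.isPrefixOf l := by
  intro l
  induction l with
  | nil => intro x _ h; simpa [pvRep_nil] using h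
  | cons c t ih =>
    intro x hv h
    rw [pvRep_cons] at h
    by_cases hp : (o :: os).isPrefixOf (c :: t)
    · simp only [hp, if_true] at h
      cases x with
      | nil => simp [List.isPrefixOf]
      | cons a x' =>
        exfalso
        simp only [List.cons_append, List.nil_append, List.isPrefixOf,
          Bool.and_eq_true, beq_iff_eq] at h
        exact hv (by simp [h.1])
    · simp only [hp, Bool.false_eq_true, if_false] at h
      cases x with
      | nil => simp [List.isPrefixOf]
      | cons a x' =>
        simp only [List.isPrefixOf, Bool.and_eq_true, beq_iff_eq] at h ⊢
        exact ⟨h.1, ih x' (fun hm => hv (by simp [hm])) h.2⟩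

-- the six passes of A, in A's order
def pvRQ (l : List Char) : List Char := pvRep '&' ['q', 'u', 'o', 't', ';'] ['"'] l
def pvRA (l : List Char) : List Char := pvRep '&' ['a', 'p', 'o', 's', ';'] ['\''] l
def pvRG (l : List Char) : List Char := pvRep '&' ['g', 't', ';'] ['>'] l
def pvRL (l : List Char) : List Char := pvRep '&' ['l', 't', ';'] ['<'] l
def pvRF (l : List Char) : List Char := pvRep '&' ['f', 'r', 'a', 's', 'l', ';'] ['/'] l
def pvRM (l : List Char) : List Char := pvRep '&' ['a', 'm', 'p', ';'] ['&'] l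

def pvChain (l : List Char) : List Char := pvRM (pvRF (pvRL (pvRG (pvRA (pvRQ l)))))

theorem pvRep_match (o : Char) (os new X : List Char) :
    pvRep o os new ((o :: os) ++ X) = new ++ pvRep o os new X := by
  rw [List.cons_append, pvRep_cons]
  have hp : (o :: os).isPrefixOf (o :: (os ++ X)) = true :=
    List.isPrefixOf_iff_prefix.mpr (List.cons_append .. ▸ List.prefix_append (o :: os) X)
  simp [hp]

theorem pvRep_cons_neg (o c : Char) (os new t : List Char)
    (h : ¬ (o :: os).isPrefixOf (c :: t) = true) :
    pvRep o os new (c :: t) = c :: pvRep o os new t := by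
  rw [pvRep_cons]; simp [h]

theorem pvRep_cons_ne (o c : Char) (os new t : List Char) (h : o ≠ c) :
    pvRep o os new (c :: t) = c :: pvRep o os new t := by
  apply pvRep_cons_neg
  simp [List.isPrefixOf]
  intro hc
  exact absurd hc h

theorem pv_cons_pref {a c : Char} {es X : List Char}
    (h : (a :: es).isPrefixOf (c :: X) = true) : a = c ∧ es.isPrefixOf X = true := by
  simpa [List.isPrefixOf] using h

theorem pv_decomp {e X : List Char} (h : e.isPrefixOf X = true) :
    X = e ++ X.drop e.length := by
  obtain ⟨w, hw⟩ := List.isPrefixOf_iff_prefix.mp h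
  rw [← hw]; simp

theorem pv_skip_of_div (o : Char) (os new x : List Char)
    (h : ∀ p, p < x.length → ∃ d, d < (o :: os).length ∧ d < (x.drop p).length ∧
      (o :: os)[d]? ≠ (x.drop p)[d]?) :
    ∀ y, pvRep o os new (x ++ y) = x ++ pvRep o os new y := by
  intro y
  apply pvRep_skip
  intro p hp
  obtain ⟨d, h1, h2, h3⟩ := h p hp
  exact pv_not_prefix_of_mismatch (o :: os) (x.drop p) y d h1 h2 h3

theorem pvScan_cons (c : Char) (t : List Char) : pvScan (c :: t) =
    (if c = '&' then
      if pvEQ.isPrefixOf (c :: t) then '"' :: pvScan (t.drop 5)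
      else if pvEA.isPrefixOf (c :: t) then '\'' :: pvScan (t.drop 5)
      else if pvEG.isPrefixOf (c :: t) then '>' :: pvScan (t.drop 3)
      else if pvEL.isPrefixOf (c :: t) then '<' :: pvScan (t.drop 3)
      else if pvEF.isPrefixOf (c :: t) then '/' :: pvScan (t.drop 6)
      else if pvEM.isPrefixOf (c :: t) then '&' :: pvScan (t.drop 4)
      else c :: pvScan t
    else c :: pvScan t) := by
  rw [pvScan]

theorem pvPassQ_neg (c : Char) (X : List Char) (h : ¬ pvEQ.isPrefixOf (c :: X) = true) :
    pvRQ (c :: X) = c :: pvRQ X := by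
  simp only [pvRQ]
  exact pvRep_cons_neg _ _ _ _ _ (by simpa only [pvEQ] using h)

theorem pvStepQ (u : List Char) : pvRQ (pvEQ ++ u) = '"' :: pvRQ u := by
  simp only [pvRQ, pvEQ]
  simpa using pvRep_match '&' ['q', 'u', 'o', 't', ';'] ['"'] u

theorem pvPassA_neg (c : Char) (X : List Char) (h : ¬ pvEA.isPrefixOf (c :: X) = true) :
    pvRA (c :: X) = c :: pvRA X := by
  simp only [pvRA]
  exact pvRep_cons_neg _ _ _ _ _ (by simpa only [pvEA] using h)

theorem pvPassA_ne (c : Char) (X : List Char) (h : c ≠ '&') :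
    pvRA (c :: X) = c :: pvRA X := by
  simp only [pvRA]
  exact pvRep_cons_ne _ _ _ _ _ (fun he => h he.symm)

theorem pvStepA (u : List Char) : pvRA (pvEA ++ u) = '\'' :: pvRA u := by
  simp only [pvRA, pvEA]
  simpa using pvRep_match '&' ['a', 'p', 'o', 's', ';'] ['\''] u

theorem pvPassG_neg (c : Char) (X : List Char) (h : ¬ pvEG.isPrefixOf (c :: X) = true) :
    pvRG (c :: X) = c :: pvRG X := by
  simp only [pvRG]
  exact pvRep_cons_neg _ _ _ _ _ (by simpa only [pvEG] using h)

theorem pvPassG_ne (c : Char) (X : List Char) (h : c ≠ '&') :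
    pvRG (c :: X) = c :: pvRG X := by
  simp only [pvRG]
  exact pvRep_cons_ne _ _ _ _ _ (fun he => h he.symm)

theorem pvStepG (u : List Char) : pvRG (pvEG ++ u) = '>' :: pvRG u := by
  simp only [pvRG, pvEG]
  simpa using pvRep_match '&' ['g', 't', ';'] ['>'] u

theorem pvPassL_neg (c : Char) (X : List Char) (h : ¬ pvEL.isPrefixOf (c :: X) = true) :
    pvRL (c :: X) = c :: pvRL X := by
  simp only [pvRL]
  exact pvRep_cons_neg _ _ _ _ _ (by simpa only [pvEL] using h)

theorem pvPassL_ne (c : Char) (X : List Char) (h : c ≠ '&') :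
    pvRL (c :: X) = c :: pvRL X := by
  simp only [pvRL]
  exact pvRep_cons_ne _ _ _ _ _ (fun he => h he.symm)

theorem pvStepL (u : List Char) : pvRL (pvEL ++ u) = '<' :: pvRL u := by
  simp only [pvRL, pvEL]
  simpa using pvRep_match '&' ['l', 't', ';'] ['<'] u

theorem pvPassF_neg (c : Char) (X : List Char) (h : ¬ pvEF.isPrefixOf (c :: X) = true) :
    pvRF (c :: X) = c :: pvRF X := by
  simp only [pvRF]
  exact pvRep_cons_neg _ _ _ _ _ (by simpa only [pvEF] using h)

theorem pvPassF_ne (c : Char) (X : List Char) (h : c ≠ '&') :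
    pvRF (c :: X) = c :: pvRF X := by
  simp only [pvRF]
  exact pvRep_cons_ne _ _ _ _ _ (fun he => h he.symm)

theorem pvStepF (u : List Char) : pvRF (pvEF ++ u) = '/' :: pvRF u := by
  simp only [pvRF, pvEF]
  simpa using pvRep_match '&' ['f', 'r', 'a', 's', 'l', ';'] ['/'] u

theorem pvPassM_neg (c : Char) (X : List Char) (h : ¬ pvEM.isPrefixOf (c :: X) = true) :
    pvRM (c :: X) = c :: pvRM X := by
  simp only [pvRM]
  exact pvRep_cons_neg _ _ _ _ _ (by simpa only [pvEM] using h)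

theorem pvPassM_ne (c : Char) (X : List Char) (h : c ≠ '&') :
    pvRM (c :: X) = c :: pvRM X := by
  simp only [pvRM]
  exact pvRep_cons_ne _ _ _ _ _ (fun he => h he.symm)

theorem pvStepM (u : List Char) : pvRM (pvEM ++ u) = '&' :: pvRM u := by
  simp only [pvRM, pvEM]
  simpa using pvRep_match '&' ['a', 'm', 'p', ';'] ['&'] u

theorem pvSkipQA : ∀ y, pvRQ (pvEA ++ y) = pvEA ++ pvRQ y := by
  simp only [pvRQ, pvEA]
  exact pv_skip_of_div _ _ _ _ (by decide)

theorem pvSkipQG : ∀ y, pvRQ (pvEG ++ y) = pvEG ++ pvRQ y := by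
  simp only [pvRQ, pvEG]
  exact pv_skip_of_div _ _ _ _ (by decide)

theorem pvSkipAG : ∀ y, pvRA (pvEG ++ y) = pvEG ++ pvRA y := by
  simp only [pvRA, pvEG]
  exact pv_skip_of_div _ _ _ _ (by decide)

theorem pvSkipQL : ∀ y, pvRQ (pvEL ++ y) = pvEL ++ pvRQ y := by
  simp only [pvRQ, pvEL]
  exact pv_skip_of_div _ _ _ _ (by decide)

theorem pvSkipAL : ∀ y, pvRA (pvEL ++ y) = pvEL ++ pvRA y := by
  simp only [pvRA, pvEL]
  exact pv_skip_of_div _ _ _ _ (by decide)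

theorem pvSkipGL : ∀ y, pvRG (pvEL ++ y) = pvEL ++ pvRG y := by
  simp only [pvRG, pvEL]
  exact pv_skip_of_div _ _ _ _ (by decide)

theorem pvSkipQF : ∀ y, pvRQ (pvEF ++ y) = pvEF ++ pvRQ y := by
  simp only [pvRQ, pvEF]
  exact pv_skip_of_div _ _ _ _ (by decide)

theorem pvSkipAF : ∀ y, pvRA (pvEF ++ y) = pvEF ++ pvRA y := by
  simp only [pvRA, pvEF]
  exact pv_skip_of_div _ _ _ _ (by decide)

theorem pvSkipGF : ∀ y, pvRG (pvEF ++ y) = pvEF ++ pvRG y := by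
  simp only [pvRG, pvEF]
  exact pv_skip_of_div _ _ _ _ (by decide)

theorem pvSkipLF : ∀ y, pvRL (pvEF ++ y) = pvEF ++ pvRL y := by
  simp only [pvRL, pvEF]
  exact pv_skip_of_div _ _ _ _ (by decide)

theorem pvSkipQM : ∀ y, pvRQ (pvEM ++ y) = pvEM ++ pvRQ y := by
  simp only [pvRQ, pvEM]
  exact pv_skip_of_div _ _ _ _ (by decide)

theorem pvSkipAM : ∀ y, pvRA (pvEM ++ y) = pvEM ++ pvRA y := by
  simp only [pvRA, pvEM]
  exact pv_skip_of_div _ _ _ _ (by decide)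

theorem pvSkipGM : ∀ y, pvRG (pvEM ++ y) = pvEM ++ pvRG y := by
  simp only [pvRG, pvEM]
  exact pv_skip_of_div _ _ _ _ (by decide)

theorem pvSkipLM : ∀ y, pvRL (pvEM ++ y) = pvEM ++ pvRL y := by
  simp only [pvRL, pvEM]
  exact pv_skip_of_div _ _ _ _ (by decide)

theorem pvSkipFM : ∀ y, pvRF (pvEM ++ y) = pvEM ++ pvRF y := by
  simp only [pvRF, pvEM]
  exact pv_skip_of_div _ _ _ _ (by decide)

theorem pvChain_eq_scan : ∀ (n : Nat) (l : List Char), l.length ≤ n → pvChain l = pvScan l := by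
  intro n
  induction n with
  | zero =>
    intro l h
    have hl : l = [] := List.eq_nil_of_length_eq_zero (Nat.le_zero.mp h)
    subst hl
    simp [pvChain, pvRM, pvRF, pvRL, pvRG, pvRA, pvRQ, pvRep_nil, pvScan]
  | succ n ih =>
    intro l h
    cases l with
    | nil => simp [pvChain, pvRM, pvRF, pvRL, pvRG, pvRA, pvRQ, pvRep_nil, pvScan]
    | cons c t =>
      by_cases hQ : pvEQ.isPrefixOf (c :: t)
      · have hc : c = '&' := by
          have h2 : pvEQ.isPrefixOf (c :: t) = true := hQ
          simp only [pvEQ] at h2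
          exact (pv_cons_pref h2).1.symm
        have hd : c :: t = pvEQ ++ t.drop 5 := by
          simpa [pvEQ] using pv_decomp hQ
        have hchain : pvChain (c :: t) = '"' :: pvChain (t.drop 5) := by
          rw [pvChain, hd, pvStepQ]
          rw [pvPassA_ne _ _ (by decide), pvPassG_ne _ _ (by decide), pvPassL_ne _ _ (by decide), pvPassF_ne _ _ (by decide), pvPassM_ne _ _ (by decide)]
          rw [pvChain]
        have hscan : pvScan (c :: t) = '"' :: pvScan (t.drop 5) := by
          rw [pvScan_cons, if_pos hc, if_pos hQ]
        rw [hchain, hscan]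
        exact congrArg _ (ih _ (by simp only [List.length_cons] at h; simp only [List.length_drop]; omega))
      by_cases hA : pvEA.isPrefixOf (c :: t)
      · have hc : c = '&' := by
          have h2 : pvEA.isPrefixOf (c :: t) = true := hA
          simp only [pvEA] at h2
          exact (pv_cons_pref h2).1.symm
        have hd : c :: t = pvEA ++ t.drop 5 := by
          simpa [pvEA] using pv_decomp hA
        have hchain : pvChain (c :: t) = '\'' :: pvChain (t.drop 5) := by
          rw [pvChain, hd, pvSkipQA, pvStepA]
          rw [pvPassG_ne _ _ (by decide), pvPassL_ne _ _ (by decide), pvPassF_ne _ _ (by decide), pvPassM_ne _ _ (by decide)]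
          rw [pvChain]
        have hscan : pvScan (c :: t) = '\'' :: pvScan (t.drop 5) := by
          rw [pvScan_cons, if_pos hc, if_neg hQ, if_pos hA]
        rw [hchain, hscan]
        exact congrArg _ (ih _ (by simp only [List.length_cons] at h; simp only [List.length_drop]; omega))
      by_cases hG : pvEG.isPrefixOf (c :: t)
      · have hc : c = '&' := by
          have h2 : pvEG.isPrefixOf (c :: t) = true := hG
          simp only [pvEG] at h2
          exact (pv_cons_pref h2).1.symm
        have hd : c :: t = pvEG ++ t.drop 3 := by
          simpa [pvEG] using pv_decomp hG
        have hchain : pvChain (c :: t) = '>' :: pvChain (t.drop 3) := by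
          rw [pvChain, hd, pvSkipQG, pvSkipAG, pvStepG]
          rw [pvPassL_ne _ _ (by decide), pvPassF_ne _ _ (by decide), pvPassM_ne _ _ (by decide)]
          rw [pvChain]
        have hscan : pvScan (c :: t) = '>' :: pvScan (t.drop 3) := by
          rw [pvScan_cons, if_pos hc, if_neg hQ, if_neg hA, if_pos hG]
        rw [hchain, hscan]
        exact congrArg _ (ih _ (by simp only [List.length_cons] at h; simp only [List.length_drop]; omega))
      by_cases hL : pvEL.isPrefixOf (c :: t)
      · have hc : c = '&' := by
          have h2 : pvEL.isPrefixOf (c :: t) = true := hL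
          simp only [pvEL] at h2
          exact (pv_cons_pref h2).1.symm
        have hd : c :: t = pvEL ++ t.drop 3 := by
          simpa [pvEL] using pv_decomp hL
        have hchain : pvChain (c :: t) = '<' :: pvChain (t.drop 3) := by
          rw [pvChain, hd, pvSkipQL, pvSkipAL, pvSkipGL, pvStepL]
          rw [pvPassF_ne _ _ (by decide), pvPassM_ne _ _ (by decide)]
          rw [pvChain]
        have hscan : pvScan (c :: t) = '<' :: pvScan (t.drop 3) := by
          rw [pvScan_cons, if_pos hc, if_neg hQ, if_neg hA, if_neg hG, if_pos hL]
        rw [hchain, hscan]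
        exact congrArg _ (ih _ (by simp only [List.length_cons] at h; simp only [List.length_drop]; omega))
      by_cases hF : pvEF.isPrefixOf (c :: t)
      · have hc : c = '&' := by
          have h2 : pvEF.isPrefixOf (c :: t) = true := hF
          simp only [pvEF] at h2
          exact (pv_cons_pref h2).1.symm
        have hd : c :: t = pvEF ++ t.drop 6 := by
          simpa [pvEF] using pv_decomp hF
        have hchain : pvChain (c :: t) = '/' :: pvChain (t.drop 6) := by
          rw [pvChain, hd, pvSkipQF, pvSkipAF, pvSkipGF, pvSkipLF, pvStepF]
          rw [pvPassM_ne _ _ (by decide)]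
          rw [pvChain]
        have hscan : pvScan (c :: t) = '/' :: pvScan (t.drop 6) := by
          rw [pvScan_cons, if_pos hc, if_neg hQ, if_neg hA, if_neg hG, if_neg hL, if_pos hF]
        rw [hchain, hscan]
        exact congrArg _ (ih _ (by simp only [List.length_cons] at h; simp only [List.length_drop]; omega))
      by_cases hM : pvEM.isPrefixOf (c :: t)
      · have hc : c = '&' := by
          have h2 : pvEM.isPrefixOf (c :: t) = true := hM
          simp only [pvEM] at h2
          exact (pv_cons_pref h2).1.symm
        have hd : c :: t = pvEM ++ t.drop 4 := by
          simpa [pvEM] using pv_decomp hM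
        have hchain : pvChain (c :: t) = '&' :: pvChain (t.drop 4) := by
          rw [pvChain, hd, pvSkipQM, pvSkipAM, pvSkipGM, pvSkipLM, pvSkipFM, pvStepM]
          rw [pvChain]
        have hscan : pvScan (c :: t) = '&' :: pvScan (t.drop 4) := by
          rw [pvScan_cons, if_pos hc, if_neg hQ, if_neg hA, if_neg hG, if_neg hL, if_neg hF, if_pos hM]
        rw [hchain, hscan]
        exact congrArg _ (ih _ (by simp only [List.length_cons] at h; simp only [List.length_drop]; omega))
      -- no entity matches at this position
      have hA2 : ¬ pvEA.isPrefixOf (c :: pvRQ t) = true := by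
        intro hh
        simp only [pvEA] at hh
        obtain ⟨hc2, htl⟩ := pv_cons_pref hh
        simp only [pvRQ] at htl
        have htl := pv_prefix_pvRep '&' ['q', 'u', 'o', 't', ';'] '"' _ ['a', 'p', 'o', 's', ';'] (by decide) htl
        refine hA ?_
        simp only [pvEA, List.isPrefixOf, Bool.and_eq_true, beq_iff_eq]
        exact ⟨hc2, htl⟩
      have hG2 : ¬ pvEG.isPrefixOf (c :: pvRA (pvRQ t)) = true := by
        intro hh
        simp only [pvEG] at hh
        obtain ⟨hc2, htl⟩ := pv_cons_pref hh
        simp only [pvRA] at htl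
        have htl := pv_prefix_pvRep '&' ['a', 'p', 'o', 's', ';'] '\'' _ ['g', 't', ';'] (by decide) htl
        simp only [pvRQ] at htl
        have htl := pv_prefix_pvRep '&' ['q', 'u', 'o', 't', ';'] '"' _ ['g', 't', ';'] (by decide) htl
        refine hG ?_
        simp only [pvEG, List.isPrefixOf, Bool.and_eq_true, beq_iff_eq]
        exact ⟨hc2, htl⟩
      have hL2 : ¬ pvEL.isPrefixOf (c :: pvRG (pvRA (pvRQ t))) = true := by
        intro hh
        simp only [pvEL] at hh
        obtain ⟨hc2, htl⟩ := pv_cons_pref hh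
        simp only [pvRG] at htl
        have htl := pv_prefix_pvRep '&' ['g', 't', ';'] '>' _ ['l', 't', ';'] (by decide) htl
        simp only [pvRA] at htl
        have htl := pv_prefix_pvRep '&' ['a', 'p', 'o', 's', ';'] '\'' _ ['l', 't', ';'] (by decide) htl
        simp only [pvRQ] at htl
        have htl := pv_prefix_pvRep '&' ['q', 'u', 'o', 't', ';'] '"' _ ['l', 't', ';'] (by decide) htl
        refine hL ?_
        simp only [pvEL, List.isPrefixOf, Bool.and_eq_true, beq_iff_eq]
        exact ⟨hc2, htl⟩
      have hF2 : ¬ pvEF.isPrefixOf (c :: pvRL (pvRG (pvRA (pvRQ t)))) = true := by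
        intro hh
        simp only [pvEF] at hh
        obtain ⟨hc2, htl⟩ := pv_cons_pref hh
        simp only [pvRL] at htl
        have htl := pv_prefix_pvRep '&' ['l', 't', ';'] '<' _ ['f', 'r', 'a', 's', 'l', ';'] (by decide) htl
        simp only [pvRG] at htl
        have htl := pv_prefix_pvRep '&' ['g', 't', ';'] '>' _ ['f', 'r', 'a', 's', 'l', ';'] (by decide) htl
        simp only [pvRA] at htl
        have htl := pv_prefix_pvRep '&' ['a', 'p', 'o', 's', ';'] '\'' _ ['f', 'r', 'a', 's', 'l', ';'] (by decide) htl
        simp only [pvRQ] at htl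
        have htl := pv_prefix_pvRep '&' ['q', 'u', 'o', 't', ';'] '"' _ ['f', 'r', 'a', 's', 'l', ';'] (by decide) htl
        refine hF ?_
        simp only [pvEF, List.isPrefixOf, Bool.and_eq_true, beq_iff_eq]
        exact ⟨hc2, htl⟩
      have hM2 : ¬ pvEM.isPrefixOf (c :: pvRF (pvRL (pvRG (pvRA (pvRQ t))))) = true := by
        intro hh
        simp only [pvEM] at hh
        obtain ⟨hc2, htl⟩ := pv_cons_pref hh
        simp only [pvRF] at htl
        have htl := pv_prefix_pvRep '&' ['f', 'r', 'a', 's', 'l', ';'] '/' _ ['a', 'm', 'p', ';'] (by decide) htl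
        simp only [pvRL] at htl
        have htl := pv_prefix_pvRep '&' ['l', 't', ';'] '<' _ ['a', 'm', 'p', ';'] (by decide) htl
        simp only [pvRG] at htl
        have htl := pv_prefix_pvRep '&' ['g', 't', ';'] '>' _ ['a', 'm', 'p', ';'] (by decide) htl
        simp only [pvRA] at htl
        have htl := pv_prefix_pvRep '&' ['a', 'p', 'o', 's', ';'] '\'' _ ['a', 'm', 'p', ';'] (by decide) htl
        simp only [pvRQ] at htl
        have htl := pv_prefix_pvRep '&' ['q', 'u', 'o', 't', ';'] '"' _ ['a', 'm', 'p', ';'] (by decide) htl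
        refine hM ?_
        simp only [pvEM, List.isPrefixOf, Bool.and_eq_true, beq_iff_eq]
        exact ⟨hc2, htl⟩
      have hchain : pvChain (c :: t) = c :: pvChain t := by
        rw [pvChain, pvPassQ_neg _ _ hQ, pvPassA_neg _ _ hA2, pvPassG_neg _ _ hG2, pvPassL_neg _ _ hL2, pvPassF_neg _ _ hF2, pvPassM_neg _ _ hM2]
        rw [pvChain]
      have hscan : pvScan (c :: t) = c :: pvScan t := by
        rw [pvScan_cons]
        by_cases hc : c = '&'
        · rw [if_pos hc, if_neg hQ, if_neg hA, if_neg hG, if_neg hL, if_neg hF, if_neg hM]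
        · rw [if_neg hc]
      rw [hchain, hscan]
      exact congrArg _ (ih t (by simp only [List.length_cons] at h; omega))


theorem pvToList_ofList (l : List Char) : (String.ofList l).toList = l := by
  simp

-- ===== VERDICT (by name: the statement is the Claim_ definition above) =====
theorem entityParser_spec : Claim_equal_entityParser := by
  intro text _
  unfold Spec_entityParser entityParser entityParser_alt
  simp only [List.foldl]
  simp only [PySem.Str.replace, pvToList_ofList]
  rw [show ("&quot;" : String).toList = ['&', 'q', 'u', 'o', 't', ';'] from rfl]
  rw [show ("\"" : String).toList = ['"'] from rfl]
  rw [show ("&apos;" : String).toList = ['&', 'a', 'p', 'o', 's', ';'] from rfl]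
  rw [show ("'" : String).toList = ['\''] from rfl]
  rw [show ("&gt;" : String).toList = ['&', 'g', 't', ';'] from rfl]
  rw [show (">" : String).toList = ['>'] from rfl]
  rw [show ("&lt;" : String).toList = ['&', 'l', 't', ';'] from rfl]
  rw [show ("<" : String).toList = ['<'] from rfl]
  rw [show ("&frasl;" : String).toList = ['&', 'f', 'r', 'a', 's', 'l', ';'] from rfl]
  rw [show ("/" : String).toList = ['/'] from rfl]
  rw [show ("&amp;" : String).toList = ['&', 'a', 'm', 'p', ';'] from rfl]
  rw [show ("&" : String).toList = ['&'] from rfl]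
  simp only [pvReplace_eq]
  have hmain := pvChain_eq_scan text.toList.length text.toList (le_refl _)
  simp only [pvChain, pvRM, pvRF, pvRL, pvRG, pvRA, pvRQ] at hmain
  rw [hmain]
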